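-- pv_equiv track=rewrite | github.com/kh277/BOJ | 백준/Gold/32631. 두 덱/두 덱.py | solve
-- ===== SOURCE A (Python) =====
-- INF = 10**13
--
-- def calWeight(N, K, bag):
--     # 각 가방 별 누적합 계산
--     accSum = [0] * N
--     accSum[0] = bag[0]
--     for i in range(1, N):
--         accSum[i] = accSum[i-1] + bag[i]
--
--     # 물건을 i개 제외했을 때의 최소 무게 계산
--     result = [INF] * (K+1)
--     for i in range(K+1):
--         minV = accSum[N-1-i]
--         for start in range(1, i+1):
--             end = N-1 - i + start
--             minV = min(minV, accSum[end] - accSum[start-1])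
--         result[i] = minV
--
--     return result
--
-- def solve(N, K, bag1, bag2):
--     # 각 가방에서 물건을 일정 개수 뺐을 때 나오는 최소 무게 구하기
--     res1 = calWeight(N, K, bag1)
--     res2 = calWeight(N, K, bag2)
--
--     # 각 가방에서 제외하는 물건의 개수를 다르게 해 가며 최적해 탐색
--     result = INF
--     for i in range(K+1):
--         cur = max(res1[i], res2[K-i])
--         result = min(result, cur)
--
--     return result
-- ===== SOURCE B (Python) =====
-- INF = 10**13
--
-- def minsPerRemoved(N, K, bag):
--     # minimum contiguous-window sum of bag[0:N] for each window length N-i, i = 0..K,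
--     # via sliding windows; the first-window sum is maintained incrementally across lengths
--     total = 0
--     for j in range(N):
--         total += bag[j]
--     res = []
--     s0 = total  # sum of bag[0:N-i]
--     for i in range(K + 1):
--         L = N - i
--         s = s0
--         m = s0
--         for j in range(L, N):
--             s = s + bag[j] - bag[j - L]
--             m = min(m, s)
--         res.append(m)
--         s0 -= bag[L - 1]
--     return res
--
-- def solve(N, K, bag1, bag2):
--     res1 = minsPerRemoved(N, K, bag1)
--     res2 = minsPerRemoved(N, K, bag2)
--     best = INF
--     for i in range(K + 1):
--         best = min(best, max(res1[i], res2[K - i]))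
--     return best
-- ===== Notes on version B (the rewrite author's own statement) =====
-- stated objective: alternative
-- what changed: B drops the prefix-sum array and A's per-length index arithmetic: per bag it computes each window-length minimum with a sliding window maintaining a running sum, and maintains the first-window sum incrementally across lengths instead of consulting a prefix-sum table.
-- outside the precondition, e.g. on solve(2, 2, [-8, -6], [-4, -8]): A returns -12, B returns -8
import Mathlib
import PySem

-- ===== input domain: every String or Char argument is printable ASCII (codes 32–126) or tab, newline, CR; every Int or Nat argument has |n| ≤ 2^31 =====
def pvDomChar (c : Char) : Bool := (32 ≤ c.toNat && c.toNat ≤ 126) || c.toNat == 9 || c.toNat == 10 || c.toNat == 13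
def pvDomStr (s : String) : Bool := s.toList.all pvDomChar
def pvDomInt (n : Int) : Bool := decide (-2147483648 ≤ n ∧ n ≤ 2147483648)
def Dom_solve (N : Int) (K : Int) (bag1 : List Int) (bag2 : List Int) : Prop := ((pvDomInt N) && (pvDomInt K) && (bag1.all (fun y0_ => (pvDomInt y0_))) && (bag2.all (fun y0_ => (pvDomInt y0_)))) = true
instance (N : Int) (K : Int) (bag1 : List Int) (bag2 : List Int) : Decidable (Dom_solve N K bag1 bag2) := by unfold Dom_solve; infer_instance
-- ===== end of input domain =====

-- B replaces A's prefix-sum array and index arithmetic by a direct sliding-window minimum per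
-- window length, fused into the combining loop (alternative decomposition, same asymptotic cost).

-- ===== PORT A =====
def pyINF : Int := 10 ^ 13

def calWeight (N : Int) (K : Int) (bag : List Int) : List Int :=
  let accSum := (PySem.List.pyRange 1 N 1).foldl
    (fun acc i => acc ++ [PySem.List.pyGetD acc (i - 1) 0 + PySem.List.pyGetD bag i 0])
    [PySem.List.pyGetD bag 0 0]
  (PySem.List.pyRange 0 (K + 1) 1).foldl
    (fun res i =>
      let minV := (PySem.List.pyRange 1 (i + 1) 1).foldl
        (fun m start =>
          min m (PySem.List.pyGetD accSum (N - 1 - i + start) 0 -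
                 PySem.List.pyGetD accSum (start - 1) 0))
        (PySem.List.pyGetD accSum (N - 1 - i) 0)
      res ++ [minV]) []

def solve (N : Int) (K : Int) (bag1 : List Int) (bag2 : List Int) : Int :=
  let res1 := calWeight N K bag1
  let res2 := calWeight N K bag2
  (PySem.List.pyRange 0 (K + 1) 1).foldl
    (fun result i =>
      min result (max (PySem.List.pyGetD res1 i 0) (PySem.List.pyGetD res2 (K - i) 0)))
    pyINF

-- ===== PORT B =====
def minsPerRemoved (N : Int) (K : Int) (bag : List Int) : List Int :=
  let total := (PySem.List.pyRange 0 N 1).foldl (fun s j => s + PySem.List.pyGetD bag j 0) 0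
  ((PySem.List.pyRange 0 (K + 1) 1).foldl
    (fun rs i =>
      let L := N - i
      let p := (PySem.List.pyRange L N 1).foldl
        (fun sm j =>
          (sm.1 + PySem.List.pyGetD bag j 0 - PySem.List.pyGetD bag (j - L) 0,
           min sm.2 (sm.1 + PySem.List.pyGetD bag j 0 - PySem.List.pyGetD bag (j - L) 0)))
        (rs.2, rs.2)
      (rs.1 ++ [p.2], rs.2 - PySem.List.pyGetD bag (L - 1) 0))
    ([], total)).1

def solve_alt (N : Int) (K : Int) (bag1 : List Int) (bag2 : List Int) : Int :=
  let res1 := minsPerRemoved N K bag1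
  let res2 := minsPerRemoved N K bag2
  (PySem.List.pyRange 0 (K + 1) 1).foldl
    (fun best i =>
      min best (max (PySem.List.pyGetD res1 i 0) (PySem.List.pyGetD res2 (K - i) 0)))
    pyINF

-- ===== PRECONDITION & SPEC =====
-- Pre_ keeps the problem's natural domain: at least one item, bags long enough, K ≤ N removals.
-- It excludes K ≥ N+1 (A raises IndexError there) and the degenerate K = N when either bag's
-- first-N total is negative: there A's value for the length-0 "window" comes from accSum[-1]
-- negative-index wraparound (it reads min(total, 0)) — an accident of the prefix-sum encoding;
-- B's sliding window yields 0 for the empty window.  With nonnegative totals the two coincide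
-- and those K = N inputs are kept inside Pre_.
def Pre_solve (N : Int) (K : Int) (bag1 : List Int) (bag2 : List Int) : Prop :=
  1 ≤ N ∧ N ≤ bag1.length ∧ N ≤ bag2.length ∧
    (K ≤ N - 1 ∨ (K = N ∧ 0 ≤ (bag1.take N.toNat).sum ∧ 0 ≤ (bag2.take N.toNat).sum))
instance (N : Int) (K : Int) (bag1 : List Int) (bag2 : List Int) : Decidable (Pre_solve N K bag1 bag2) := by unfold Pre_solve; infer_instance

def pvWitness_solve : Int × Int × List Int × List Int := (3, 1, [1, 2, 3], [4, 5, 6])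

def Spec_solve (N : Int) (K : Int) (bag1 : List Int) (bag2 : List Int) (out : Int) : Prop := out = solve_alt N K bag1 bag2
instance (N : Int) (K : Int) (bag1 : List Int) (bag2 : List Int) (out : Int) : Decidable (Spec_solve N K bag1 bag2 out) := by unfold Spec_solve; infer_instance

-- ===== CLAIM (what is proved, stated in full; the proofs are below) =====
def Claim_equal_solve : Prop := ∀ (N : Int) (K : Int) (bag1 : List Int) (bag2 : List Int), Dom_solve N K bag1 bag2 → Pre_solve N K bag1 bag2 → Spec_solve N K bag1 bag2 (solve N K bag1 bag2)

-- ===== LEMMAS AND PROOFS =====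

-- prefix sum of the first j elements
def pref (bag : List Int) (j : Nat) : Int := (bag.take j).sum
-- sum of the window of length L starting at t
def win (bag : List Int) (t L : Nat) : Int := pref bag (t + L) - pref bag t

theorem pyRange_one_eq (a b : Int) :
    PySem.List.pyRange a b 1 = (List.range (b - a).toNat).map (fun k : Nat => a + (k : Int)) := by
  unfold PySem.List.pyRange
  norm_num
  split_ifs with h
  · rfl
  · rw [Int.toNat_of_nonpos (by omega)]

theorem pref_succ (bag : List Int) (j : Nat) (h : j < bag.length) :
    pref bag (j + 1) = pref bag j + bag[j] := by
  unfold pref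
  exact List.sum_take_succ bag j h

theorem win_succ (bag : List Int) (t L : Nat) (h : t + 1 + L ≤ bag.length) :
    win bag (t + 1) L = win bag t L + bag[t + L]'(by omega) - bag[t]'(by omega) := by
  simp only [win]
  have h1 : t + 1 + L = (t + L) + 1 := by omega
  rw [h1, pref_succ bag (t + L) (by omega), pref_succ bag t (by omega)]
  ring

theorem accSum_eq (bag : List Int) (n : Nat) (h1 : 1 ≤ n) (hlen : n ≤ bag.length) :
    (PySem.List.pyRange 1 (↑n) 1).foldl
      (fun acc i => acc ++ [PySem.List.pyGetD acc (i - 1) 0 + PySem.List.pyGetD bag i 0])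
      [PySem.List.pyGetD bag 0 0]
    = (List.range n).map (fun j => pref bag (j + 1)) := by
  induction n with
  | zero => omega
  | succ m ih =>
    by_cases hm : m = 0
    · subst hm
      have hr : PySem.List.pyRange 1 ((1:Nat):Int) 1 = [] := by
        rw [pyRange_one_eq]; norm_num
      rw [hr]
      have hget : PySem.List.pyGetD bag 0 0 = bag.getD 0 0 := by
        rw [show (0:Int) = ((0:Nat):Int) from rfl, PySem.List.pyGetD_natCast]
      rw [List.foldl_nil, hget, List.getD_eq_getElem bag 0 (show 0 < bag.length by omega)]
      rw [show List.range 1 = [0] from rfl]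
      simp only [List.map_cons, List.map_nil]
      rw [pref_succ bag 0 (by omega)]
      simp [pref]
    · have hm1 : 1 ≤ m := by omega
      have hcast : ((m + 1 : Nat) : Int) = (m : Int) + 1 := by push_cast; ring
      rw [hcast, PySem.List.pyRange_one_succ_right (by exact_mod_cast hm1), List.foldl_append,
          ih hm1 (by omega)]
      simp only [List.foldl_cons, List.foldl_nil]
      have hidx : ((m : Int) - 1) = ((m - 1 : Nat) : Int) := by omega
      rw [hidx, PySem.List.pyGetD_natCast, PySem.List.pyGetD_natCast,
          PySem.List.getD_map_range (fun j => pref bag (j + 1)) m (m - 1) 0 (by omega),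
          List.getD_eq_getElem bag 0 (show m < bag.length by omega)]
      have : m - 1 + 1 = m := by omega
      rw [this, List.range_succ, List.map_append]
      simp [pref_succ bag m (by omega)]

theorem map_getD_range_eq_take (bag : List Int) (L : Nat) (hL : L ≤ bag.length) :
    (List.range L).map (fun k => bag.getD k 0) = bag.take L := by
  induction L with
  | zero => simp
  | succ m ih =>
    rw [List.range_succ, List.map_append, ih (by omega), List.take_succ]
    simp [List.getElem?_eq_getElem (show m < bag.length by omega)]

theorem slide (bag : List Int) (L : Nat) (c : Nat) :
    ∀ (t : Nat) (m : Int), t + L + c ≤ bag.length →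
    (((List.range c).map (fun s => ((t + L + s : Nat) : Int))).foldl
       (fun sm j =>
         (sm.1 + PySem.List.pyGetD bag j 0 - PySem.List.pyGetD bag (j - (L : Int)) 0,
          min sm.2 (sm.1 + PySem.List.pyGetD bag j 0 - PySem.List.pyGetD bag (j - (L : Int)) 0)))
       (win bag t L, m)).2
    = (List.range c).foldl (fun acc s => min acc (win bag (t + s + 1) L)) m := by
  induction c with
  | zero => intro t m _; simp
  | succ c ih =>
    intro t m hlen
    rw [List.range_succ_eq_map]
    simp only [List.map_cons, List.foldl_cons, List.map_map]
    have e1 : ((t + L + 0 : Nat) : Int) - (L : Int) = ((t : Nat) : Int) := by push_cast; ring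
    have e2 : PySem.List.pyGetD bag ((t + L + 0 : Nat) : Int) 0 = bag[t + L]'(by omega) := by
      rw [PySem.List.pyGetD_natCast]
      exact List.getD_eq_getElem bag 0 (by omega)
    have e3 : PySem.List.pyGetD bag (((t + L + 0 : Nat) : Int) - (L : Int)) 0 = bag[t]'(by omega) := by
      rw [e1, PySem.List.pyGetD_natCast]
      exact List.getD_eq_getElem bag 0 (by omega)
    rw [e2, e3]
    have hwin : win bag t L + bag[t + L]'(by omega) - bag[t]'(by omega) = win bag (t + 1) L := by
      rw [win_succ bag t L (by omega)]
    rw [hwin]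
    have hmap2 : List.map ((fun s => ((t + L + s : Nat) : Int)) ∘ Nat.succ) (List.range c)
        = List.map (fun s => (((t + 1) + L + s : Nat) : Int)) (List.range c) := by
      apply List.map_congr_left; intro s _
      simp only [Function.comp_apply]
      congr 1
      omega
    have lhs := ih (t + 1) (min m (win bag (t + 1) L)) (by omega)
    rw [hmap2, lhs, List.foldl_map]
    simp only [Nat.add_zero]
    apply PySem.List.foldl_congr_mem
    intro acc s _
    have : t + Nat.succ s + 1 = t + 1 + s + 1 := by omega
    rw [this]

-- the common per-removal-count minimum: fold of min over the window starts
def bmin (bag : List Int) (n i : Nat) : Int :=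
  (List.range i).foldl (fun acc s => min acc (win bag (s + 1) (n - i))) (win bag 0 (n - i))

theorem sum_pyRange (bag : List Int) (m : Nat) (hm : m ≤ bag.length) :
    (PySem.List.pyRange 0 ((m : Nat) : Int) 1).foldl
      (fun s j => s + PySem.List.pyGetD bag j 0) 0 = pref bag m := by
  rw [PySem.List.pyRange_zero_natCast, List.foldl_map, PySem.List.foldl_add]
  have : (List.range m).map (fun k : Nat => PySem.List.pyGetD bag (↑k) 0)
      = (List.range m).map (fun k => bag.getD k 0) := by
    apply List.map_congr_left; intro k _
    rw [PySem.List.pyGetD_natCast]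
  rw [this, map_getD_range_eq_take bag m hm]
  simp [pref]

theorem inner_eq (bag : List Int) (n c : Nat) (h1 : c + 1 ≤ n) (hlen : n ≤ bag.length) :
    ((PySem.List.pyRange ((n : Int) - (c : Int)) (↑n) 1).foldl
      (fun sm j =>
        (sm.1 + PySem.List.pyGetD bag j 0 - PySem.List.pyGetD bag (j - ((n : Int) - (c : Int))) 0,
         min sm.2 (sm.1 + PySem.List.pyGetD bag j 0 - PySem.List.pyGetD bag (j - ((n : Int) - (c : Int))) 0)))
      (pref bag (n - c), pref bag (n - c))).2
    = bmin bag n c := by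
  have hL : ((n : Int) - (c : Int)) = ((n - c : Nat) : Int) := by omega
  rw [hL]
  have hw : pref bag (n - c) = win bag 0 (n - c) := by simp [win, pref]
  rw [hw]
  have hrange : PySem.List.pyRange ((n - c : Nat) : Int) (↑n) 1
      = (List.range c).map (fun s => ((0 + (n - c) + s : Nat) : Int)) := by
    rw [pyRange_one_eq]
    have : ((n : Int) - ((n - c : Nat) : Int)).toNat = c := by omega
    rw [this]
    apply List.map_congr_left; intro s _
    push_cast; omega
  rw [hrange, slide bag (n - c) c 0 (win bag 0 (n - c)) (by omega)]
  unfold bmin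
  apply PySem.List.foldl_congr_mem
  intro acc s _
  simp only [Nat.zero_add]

theorem mins_fold (bag : List Int) (n : Nat)
    (hlen : n ≤ bag.length) :
    ∀ c, c ≤ n →
    (List.range c).foldl
      (fun rs (i : Nat) =>
        (rs.1 ++ [((PySem.List.pyRange ((n : Int) - (i : Int)) (↑n) 1).foldl
            (fun sm j =>
              (sm.1 + PySem.List.pyGetD bag j 0 - PySem.List.pyGetD bag (j - ((n : Int) - (i : Int))) 0,
               min sm.2 (sm.1 + PySem.List.pyGetD bag j 0 - PySem.List.pyGetD bag (j - ((n : Int) - (i : Int))) 0)))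
            (rs.2, rs.2)).2],
         rs.2 - PySem.List.pyGetD bag ((n : Int) - (i : Int) - 1) 0))
      ([], pref bag n)
    = ((List.range c).map (fun i => bmin bag n i), pref bag (n - c)) := by
  intro c
  induction c with
  | zero => intro _; simp
  | succ c ih =>
    intro hc
    rw [List.range_succ, List.foldl_append, ih (by omega), List.foldl_cons, List.foldl_nil,
        List.map_append]
    have hcn : c + 1 ≤ n := by omega
    refine Prod.ext ?_ ?_
    · simp only [List.map_cons, List.map_nil]
      rw [inner_eq bag n c hcn hlen]
    · simp only
      have hidx : (n : Int) - (c : Int) - 1 = ((n - c - 1 : Nat) : Int) := by omega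
      rw [hidx, PySem.List.pyGetD_natCast,
          List.getD_eq_getElem bag 0 (show n - c - 1 < bag.length by omega)]
      have hp : pref bag (n - c) = pref bag (n - c - 1) + bag[n - c - 1]'(by omega) := by
        have h := pref_succ bag (n - c - 1) (by omega)
        rw [show n - c - 1 + 1 = n - c from by omega] at h
        exact h
      rw [hp, show n - (c + 1) = n - c - 1 from by omega]
      ring

theorem foldl_min_const {α : Type} (l : List α) (a c : Int) :
    l.foldl (fun m _ => min m c) a = if l.isEmpty then a else min a c := by
  induction l generalizing a with
  | nil => rfl
  | cons x t ih =>
    rw [List.foldl_cons, ih (min a c)]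
    by_cases ht : t.isEmpty <;> simp [ht]

theorem foldl_pair_keep (l : List Int) (a : Int) :
    l.foldl (fun (sm : Int × Int) (_ : Int) => (sm.1, min sm.2 sm.1)) (a, a) = (a, a) := by
  induction l with
  | nil => rfl
  | cons x t ih => simpa using ih

theorem bmin_top (bag : List Int) (n : Nat) : bmin bag n n = 0 := by
  unfold bmin
  have h0 : win bag 0 (n - n) = 0 := by simp [win]
  rw [h0]
  have : (List.range n).foldl (fun acc s => min acc (win bag (s + 1) (n - n))) 0
      = (List.range n).foldl (fun acc (_ : Nat) => min acc (0 : Int)) 0 := by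
    apply PySem.List.foldl_congr_mem
    intro acc s _
    simp [win]
  rw [this, foldl_min_const]
  by_cases h : (List.range n).isEmpty <;> simp [h]

theorem minsPerRemoved_eq_top (bag : List Int) (N K : Int) (n : Nat)
    (hN : N = ↑n) (hK : K = ↑n) (hlen : n ≤ bag.length) :
    minsPerRemoved N K bag = (List.range (n + 1)).map (fun i => bmin bag n i) := by
  subst hN hK
  simp only [minsPerRemoved]
  rw [sum_pyRange bag n hlen]
  have hKr : ((n : Int) + 1) = ((n + 1 : Nat) : Int) := by push_cast; ring
  rw [hKr, PySem.List.pyRange_zero_natCast, List.foldl_map, List.range_succ,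
      List.foldl_append, mins_fold bag n hlen n (le_refl n), List.foldl_cons, List.foldl_nil,
      List.map_append]
  have hpref0 : pref bag (n - n) = 0 := by simp [pref]
  dsimp only
  rw [hpref0]
  have hcancel : ((PySem.List.pyRange ((n : Int) - (n : Int)) (↑n) 1).foldl
      (fun sm j =>
        (sm.1 + PySem.List.pyGetD bag j 0 - PySem.List.pyGetD bag (j - ((n : Int) - (n : Int))) 0,
         min sm.2 (sm.1 + PySem.List.pyGetD bag j 0 - PySem.List.pyGetD bag (j - ((n : Int) - (n : Int))) 0)))
      ((0 : Int), (0 : Int)))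
      = ((0 : Int), (0 : Int)) := by
    have hstep : ∀ (sm : Int × Int), ∀ j ∈ PySem.List.pyRange ((n : Int) - (n : Int)) (↑n) 1,
        (sm.1 + PySem.List.pyGetD bag j 0 - PySem.List.pyGetD bag (j - ((n : Int) - (n : Int))) 0,
         min sm.2 (sm.1 + PySem.List.pyGetD bag j 0 - PySem.List.pyGetD bag (j - ((n : Int) - (n : Int))) 0))
        = (sm.1, min sm.2 sm.1) := by
      intro sm j _
      have e1 : j - ((n : Int) - (n : Int)) = j := by ring
      rw [e1]
      have e2 : sm.1 + PySem.List.pyGetD bag j 0 - PySem.List.pyGetD bag j 0 = sm.1 := by ring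
      rw [e2]
    rw [PySem.List.foldl_congr_mem _ _ _ _ hstep, foldl_pair_keep]
  rw [hcancel]
  simp [bmin_top]

theorem calWeight_getD_top (bag : List Int) (N K : Int) (n : Nat)
    (hN : N = ↑n) (hK : K = ↑n) (h1 : 1 ≤ n) (hlen : n ≤ bag.length) :
    PySem.List.pyGetD (calWeight N K bag) (↑n) 0 = min (pref bag n) 0 := by
  subst hN hK
  unfold calWeight
  rw [accSum_eq bag n h1 hlen]
  have hKr : ((n : Int) + 1) = ((n + 1 : Nat) : Int) := by push_cast; ring
  rw [hKr, PySem.List.pyRange_zero_natCast, List.foldl_map]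
  rw [PySem.List.foldl_append_singleton_eq_map
      (f := fun (j : Nat) =>
        (PySem.List.pyRange 1 ((j : Int) + 1) 1).foldl
          (fun m start =>
            min m (PySem.List.pyGetD ((List.range n).map (fun j => pref bag (j + 1))) ((n : Int) - 1 - (j : Int) + start) 0 -
                   PySem.List.pyGetD ((List.range n).map (fun j => pref bag (j + 1))) (start - 1) 0))
          (PySem.List.pyGetD ((List.range n).map (fun j => pref bag (j + 1))) ((n : Int) - 1 - (j : Int)) 0))]
  rw [List.nil_append, PySem.List.pyGetD_natCast, PySem.List.getD_map_range _ (n + 1) n _ (by omega)]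
  have hne : ((List.range n).map (fun j => pref bag (j + 1))) ≠ [] := by
    simp [List.range_eq_nil]
    omega
  have hinit : PySem.List.pyGetD ((List.range n).map (fun j => pref bag (j + 1))) ((n : Int) - 1 - (n : Int)) 0
      = pref bag n := by
    rw [show ((n : Int) - 1 - (n : Int)) = -1 from by ring, PySem.List.pyGetD_neg_one _ 0 hne,
        List.getLast_eq_getElem]
    simp only [List.length_map, List.length_range, List.getElem_map, List.getElem_range]
    congr 1
    omega
  rw [hinit, pyRange_one_eq]
  have : ((n : Int) + 1 - 1).toNat = n := by omega
  rw [this, List.foldl_map]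
  have hterms : (List.range n).foldl
      (fun m (s : Nat) =>
        min m (PySem.List.pyGetD ((List.range n).map (fun j => pref bag (j + 1))) ((n : Int) - 1 - (n : Int) + (1 + (s : Int))) 0 -
               PySem.List.pyGetD ((List.range n).map (fun j => pref bag (j + 1))) ((1 : Int) + (s : Int) - 1) 0))
      (pref bag n)
      = (List.range n).foldl (fun m (_ : Nat) => min m (0 : Int)) (pref bag n) := by
    apply PySem.List.foldl_congr_mem
    intro acc s hs
    have hsn : s < n := List.mem_range.mp hs
    have ea : ((n : Int) - 1 - (n : Int) + (1 + (s : Int))) = ((s : Nat) : Int) := by omega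
    have eb : ((1 : Int) + (s : Int) - 1) = ((s : Nat) : Int) := by omega
    rw [ea, eb]
    simp
  rw [hterms, foldl_min_const]
  have : ¬ (List.range n).isEmpty := by
    simp [List.range_eq_nil]
    omega
  simp [this]

theorem minsPerRemoved_eq (bag : List Int) (N K : Int) (n k : Nat)
    (hN : N = ↑n) (hK : K = ↑k) (h1 : 1 ≤ n) (hk : k ≤ n - 1) (hlen : n ≤ bag.length) :
    minsPerRemoved N K bag = (List.range (k + 1)).map (fun i => bmin bag n i) := by
  subst hN hK
  simp only [minsPerRemoved]
  rw [sum_pyRange bag n hlen]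
  have hKr : ((k : Int) + 1) = ((k + 1 : Nat) : Int) := by push_cast; ring
  rw [hKr, PySem.List.pyRange_zero_natCast, List.foldl_map]
  rw [mins_fold bag n hlen (k + 1) (by omega)]

theorem mins_getD (bag : List Int) (N K : Int) (n k : Nat)
    (hN : N = ↑n) (hK : K = ↑k) (h1 : 1 ≤ n) (hk : k ≤ n - 1) (hlen : n ≤ bag.length)
    (i : Nat) (hi : i ≤ k) :
    PySem.List.pyGetD (minsPerRemoved N K bag) (↑i) 0 = bmin bag n i := by
  rw [minsPerRemoved_eq bag N K n k hN hK h1 hk hlen, PySem.List.pyGetD_natCast,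
      PySem.List.getD_map_range _ (k + 1) i _ (by omega)]

theorem calWeight_getD (bag : List Int) (N K : Int) (n k : Nat)
    (hN : N = ↑n) (hK : K = ↑k) (h1 : 1 ≤ n) (hk : k ≤ n) (hlen : n ≤ bag.length)
    (i : Nat) (hi : i ≤ k) (hi' : i ≤ n - 1) :
    PySem.List.pyGetD (calWeight N K bag) (↑i) 0 = bmin bag n i := by
  subst hN hK
  unfold calWeight
  rw [accSum_eq bag n h1 hlen]
  have hKr : ((k : Int) + 1) = ((k + 1 : Nat) : Int) := by push_cast; ring
  rw [hKr, PySem.List.pyRange_zero_natCast, List.foldl_map]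
  rw [PySem.List.foldl_append_singleton_eq_map
      (f := fun (j : Nat) =>
        (PySem.List.pyRange 1 ((j : Int) + 1) 1).foldl
          (fun m start =>
            min m (PySem.List.pyGetD ((List.range n).map (fun j => pref bag (j + 1))) ((n : Int) - 1 - (j : Int) + start) 0 -
                   PySem.List.pyGetD ((List.range n).map (fun j => pref bag (j + 1))) (start - 1) 0))
          (PySem.List.pyGetD ((List.range n).map (fun j => pref bag (j + 1))) ((n : Int) - 1 - (j : Int)) 0))]
  rw [List.nil_append, PySem.List.pyGetD_natCast, PySem.List.getD_map_range _ (k + 1) i _ (by omega)]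
  -- evaluate the inner fold for this i
  have hinner : (PySem.List.pyRange 1 ((i : Int) + 1) 1).foldl
      (fun m start =>
        min m (PySem.List.pyGetD ((List.range n).map (fun j => pref bag (j + 1))) ((n : Int) - 1 - (i : Int) + start) 0 -
               PySem.List.pyGetD ((List.range n).map (fun j => pref bag (j + 1))) (start - 1) 0))
      (PySem.List.pyGetD ((List.range n).map (fun j => pref bag (j + 1))) ((n : Int) - 1 - (i : Int)) 0)
      = (List.range i).foldl (fun acc s => min acc (win bag (s + 1) (n - i))) (win bag 0 (n - i)) := by
    have hinit : PySem.List.pyGetD ((List.range n).map (fun j => pref bag (j + 1))) ((n : Int) - 1 - (i : Int)) 0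
        = win bag 0 (n - i) := by
      have : ((n : Int) - 1 - (i : Int)) = ((n - 1 - i : Nat) : Int) := by omega
      rw [this, PySem.List.pyGetD_natCast, PySem.List.getD_map_range (fun j => pref bag (j + 1)) n (n - 1 - i) 0 (by omega)]
      have : n - 1 - i + 1 = 0 + (n - i) := by omega
      rw [this]
      simp [win, pref]
    rw [hinit, pyRange_one_eq]
    have : ((i : Int) + 1 - 1).toNat = i := by omega
    rw [this, List.foldl_map]
    apply PySem.List.foldl_congr_mem
    intro acc s hs
    have hsi : s < i := List.mem_range.mp hs
    have ea : ((n : Int) - 1 - (i : Int) + (1 + (s : Int))) = ((n - i + s : Nat) : Int) := by omega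
    have eb : ((1 : Int) + (s : Int) - 1) = ((s : Nat) : Int) := by omega
    rw [ea, eb, PySem.List.pyGetD_natCast, PySem.List.pyGetD_natCast,
        PySem.List.getD_map_range (fun j => pref bag (j + 1)) n (n - i + s) 0 (by omega),
        PySem.List.getD_map_range (fun j => pref bag (j + 1)) n s 0 (by omega)]
    have : n - i + s + 1 = (s + 1) + (n - i) := by omega
    rw [this]
    simp [win]
  rw [hinner]
  rfl

theorem mins_getD_top (bag : List Int) (N K : Int) (n : Nat)
    (hN : N = ↑n) (hK : K = ↑n) (hlen : n ≤ bag.length)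
    (i : Nat) (hi : i ≤ n) :
    PySem.List.pyGetD (minsPerRemoved N K bag) (↑i) 0 = bmin bag n i := by
  rw [minsPerRemoved_eq_top bag N K n hN hK hlen, PySem.List.pyGetD_natCast,
      PySem.List.getD_map_range _ (n + 1) i _ (by omega)]

theorem entry_eq (bag : List Int) (N K : Int) (n k : Nat)
    (hN : N = ↑n) (hK : K = ↑k) (h1 : 1 ≤ n)
    (hcase : k ≤ n - 1 ∨ (k = n ∧ 0 ≤ pref bag n)) (hlen : n ≤ bag.length)
    (i : Nat) (hi : i ≤ k) :
    PySem.List.pyGetD (calWeight N K bag) (↑i) 0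
      = PySem.List.pyGetD (minsPerRemoved N K bag) (↑i) 0 := by
  rcases hcase with hk | ⟨hk, htot⟩
  · rw [calWeight_getD bag N K n k hN hK h1 (by omega) hlen i hi (by omega),
        mins_getD bag N K n k hN hK h1 hk hlen i hi]
  · have hKn : K = ↑n := by rw [hK, hk]
    by_cases hin : i = n
    · subst hin
      rw [calWeight_getD_top bag N K i hN (by rw [hK, hk]) h1 (by omega),
          mins_getD_top bag N K i hN (by rw [hK, hk]) (by omega) i (le_refl i), bmin_top]
      omega
    · rw [calWeight_getD bag N K n n hN hKn h1 (le_refl n) hlen i (by omega) (by omega),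
          mins_getD_top bag N K n hN hKn hlen i (by omega)]

theorem solve_spec_aux (N K : Int) (bag1 bag2 : List Int)
    (hpre : Pre_solve N K bag1 bag2) : solve N K bag1 bag2 = solve_alt N K bag1 bag2 := by
  obtain ⟨hN1, hl1, hl2, hK⟩ := hpre
  unfold solve solve_alt
  apply PySem.List.foldl_congr_mem
  intro acc x hx
  rw [PySem.List.mem_pyRange_one] at hx
  obtain ⟨hx0, hx1⟩ := hx
  have hn : N = ((N.toNat : Nat) : Int) := by omega
  have hk0 : 0 ≤ K := by omega
  have hkk : K = ((K.toNat : Nat) : Int) := by omega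
  have hxx : x = ((x.toNat : Nat) : Int) := by omega
  have hKx : K - x = (((K - x).toNat : Nat) : Int) := by omega
  have hcaseN1 : K.toNat ≤ N.toNat - 1 ∨ (K.toNat = N.toNat ∧ 0 ≤ pref bag1 N.toNat) := by
    unfold pref
    rcases hK with h | ⟨h1', h2', h3'⟩
    · left; omega
    · right; exact ⟨by omega, h2'⟩
  have hcaseN2 : K.toNat ≤ N.toNat - 1 ∨ (K.toNat = N.toNat ∧ 0 ≤ pref bag2 N.toNat) := by
    unfold pref
    rcases hK with h | ⟨h1', h2', h3'⟩
    · left; omega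
    · right; exact ⟨by omega, h3'⟩
  congr 1
  congr 1
  · rw [hxx]
    exact entry_eq bag1 N K N.toNat K.toNat hn hkk (by omega) hcaseN1 (by omega) x.toNat (by omega)
  · rw [hKx]
    exact entry_eq bag2 N K N.toNat K.toNat hn hkk (by omega) hcaseN2 (by omega) (K - x).toNat (by omega)

-- ===== VERDICT (by name: the statement is the Claim_ definition above) =====
theorem solve_spec : Claim_equal_solve := by
  intro N K bag1 bag2 _ hpre
  unfold Spec_solve
  exact solve_spec_aux N K bag1 bag2 hpre
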